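-- pv_equiv track=rewrite | github.com/tanhm12/Code-Workout | Leetcode/1319.py | makeConnected
-- ===== SOURCE A (Python) =====
-- from typing import List
--
-- def makeConnected(n: int, connections: List[List[int]]) -> int:
--     if len(connections) < n-1:
--         return -1
--
--     parent = [-1 for i in range(n)]
--
--     def find_parent(u):
--         if parent[u] < 0:
--             return u
--
--         parent[u] = find_parent(parent[u])
--         return parent[u]
--
--     def merge_network(u, v):
--         pu = find_parent(u)
--         pv = find_parent(v)
--
--         if pu != pv:
--             if parent[pu] > parent[pv]:
--                 pu, pv = pv, pu
--             parent[pu] += parent[pv]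
--             parent[pv] = pu
--
--             return True
--         return False
--
--     num_of_edges = 0
--
--     for u, v in connections:
--         if merge_network(u, v):
--             num_of_edges += 1
--
--     return n - 1 - num_of_edges
-- ===== SOURCE B (Python) =====
-- from typing import List
--
-- def makeConnected(n: int, connections: List[List[int]]) -> int:
--     # Label-propagation instead of union-find: a flat component-label array,
--     # merging two components by rewriting every occurrence of one label.
--     if len(connections) < n-1:
--         return -1
--
--     comp = list(range(n))
--     merges = 0
--     for u, v in connections:
--         cu, cv = comp[u], comp[v]
--         if cu != cv:
--             merges += 1
--             comp = [cu if x == cv else x for x in comp]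
--
--     return n - 1 - merges
-- ===== Notes on version B (the rewrite author's own statement) =====
-- stated objective: simpler
-- what changed: Replaced the union-find forest (recursive find with path compression, union by size) by a flat component-label array that merges two components by rewriting every occurrence of one label, counting effective merges identically; …
-- outside the precondition, e.g. on makeConnected(1, [[0, -1]]): A returns -1, B returns 0; on makeConnected(2, [[1, -1]]): A returns 0, B returns 1
import Mathlib
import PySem

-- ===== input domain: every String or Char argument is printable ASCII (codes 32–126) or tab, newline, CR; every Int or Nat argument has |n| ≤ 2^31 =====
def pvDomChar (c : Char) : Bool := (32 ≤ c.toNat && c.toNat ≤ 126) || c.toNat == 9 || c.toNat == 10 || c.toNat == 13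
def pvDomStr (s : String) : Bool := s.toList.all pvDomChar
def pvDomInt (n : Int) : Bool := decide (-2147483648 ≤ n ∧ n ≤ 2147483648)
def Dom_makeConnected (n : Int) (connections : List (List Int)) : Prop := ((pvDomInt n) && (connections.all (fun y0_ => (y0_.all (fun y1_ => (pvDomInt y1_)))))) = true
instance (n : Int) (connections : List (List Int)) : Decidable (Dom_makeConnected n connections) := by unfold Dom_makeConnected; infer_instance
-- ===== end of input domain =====

-- B replaces A's union-find forest by a flat component-label array (merge = rewrite one
-- label); simpler: no recursion, no path compression, no sizes. Equality proved on Pre_.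

-- ===== PORT A =====
-- total read xs[i]: the `none` (IndexError) case is excluded by Pre_makeConnected
def pvG (xs : List Int) (i : Int) : Int := PySem.List.pyGetD xs i 0

-- find_parent with explicit fuel (the fuel-0 fallback is unreachable: under the
-- invariant every parent chain reaches a root in < fuel steps)
def findParent : Nat → List Int → Int → List Int × Int
  | 0, p, u => (p, u)
  | fuel+1, p, u =>
    match PySem.List.pyGet? p u with
    | none => (p, u)                     -- IndexError in Python; excluded by Pre_
    | some pu =>
      if pu < 0 then (p, u)
      else
        let r := findParent fuel p pu
        let p2 := PySem.List.pySetD r.1 u r.2   -- parent[u] = find_parent(parent[u])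
        (p2, pvG p2 u)                          -- return parent[u]

def mergeNetwork (fuel : Nat) (p : List Int) (u v : Int) : List Int × Bool :=
  let fu := findParent fuel p u
  let fv := findParent fuel fu.1 v
  let p2 := fv.1
  if fu.2 ≠ fv.2 then
    let pr := if pvG p2 fu.2 > pvG p2 fv.2 then (fv.2, fu.2) else (fu.2, fv.2)
    let p3 := PySem.List.pySetD p2 pr.1 (pvG p2 pr.1 + pvG p2 pr.2)  -- parent[pu] += parent[pv]
    let p4 := PySem.List.pySetD p3 pr.2 pr.1                         -- parent[pv] = pu
    (p4, true)
  else (p2, false)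

def makeConnected (n : Int) (connections : List (List Int)) : Int :=
  if (connections.length : Int) < n - 1 then -1
  else
    let parent := (PySem.List.pyRange 0 n 1).map (fun _ => (-1 : Int))
    let fuel := parent.length + 1
    let st := connections.foldl (fun (st : List Int × Int) conn =>
      match conn with
      | [u, v] =>
        let m := mergeNetwork fuel st.1 u v
        (m.1, if m.2 then st.2 + 1 else st.2)
      | _ => st                          -- ValueError in Python; excluded by Pre_
      ) (parent, 0)
    n - 1 - st.2

-- ===== PORT B =====
-- B's own total read xs[i]; the `none` (IndexError) case is excluded by Pre_makeConnected
def pvGB (xs : List Int) (i : Int) : Int := (PySem.List.pyGet? xs i).getD 0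

-- one edge of B's loop: merge the two labels by rewriting one of them.
-- the tuple unpack `u, v = conn` succeeds exactly when len(conn) == 2
-- (it raises ValueError otherwise; those inputs are excluded by Pre_)
def altStep (st : List Int × Int) (conn : List Int) : List Int × Int :=
  if conn.length = 2 then
    let u := conn.getD 0 0
    let v := conn.getD 1 0
    let cu := pvGB st.1 u
    let cv := pvGB st.1 v
    if cu ≠ cv then (st.1.map (fun x => if x = cv then cu else x), st.2 + 1)
    else st
  else st

def makeConnected_alt (n : Int) (connections : List (List Int)) : Int :=
  if (connections.length : Int) < n - 1 then -1
  else
    let st := connections.foldl altStep (PySem.List.pyRange 0 n 1, 0)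
    n - 1 - st.2

-- ===== PRECONDITION & SPEC =====
-- Pre_ excludes inputs (unless the edge-count guard already returns -1) whose connections
-- are not pairs of node ids in [0,n): there A raises IndexError/ValueError, or — for
-- negative ids — Python negative-index wraparound makes A's union-find treat u and u-n as
-- distinct nodes and double-count merges.
def Pre_makeConnected (n : Int) (connections : List (List Int)) : Prop :=
  (connections.length : Int) < n - 1 ∨
    ∀ c ∈ connections, c.length = 2 ∧ ∀ x ∈ c, 0 ≤ x ∧ x < n
instance (n : Int) (connections : List (List Int)) : Decidable (Pre_makeConnected n connections) := by
  unfold Pre_makeConnected; infer_instance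

def pvWitness_makeConnected : Int × List (List Int) := (4, [[0, 1], [2, 3], [1, 2]])

def Spec_makeConnected (n : Int) (connections : List (List Int)) (out : Int) : Prop := out = makeConnected_alt n connections
instance (n : Int) (connections : List (List Int)) (out : Int) : Decidable (Spec_makeConnected n connections out) := by unfold Spec_makeConnected; infer_instance

-- ===== CLAIM (what is proved, stated in full; the proofs are below) =====
def Claim_equal_makeConnected : Prop := ∀ (n : Int) (connections : List (List Int)), Dom_makeConnected n connections → Pre_makeConnected n connections → Spec_makeConnected n connections (makeConnected n connections)

-- ===== LEMMAS AND PROOFS =====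

-- entry j of an int list, Nat index (0 outside range; always used with j < length)
def nthI (xs : List Int) (j : Nat) : Int := xs.getD j 0

-- "from node j a root (negative entry) is reached in at most k parent steps"
def RootIn (p : List Int) : Nat → Nat → Prop
  | j, 0 => nthI p j < 0
  | j, k+1 => nthI p j < 0 ∨ RootIn p (nthI p j).toNat k

def numRoots (p : List Int) : Nat := p.countP (fun x => decide (x < 0))

-- the coupling invariant between A's parent forest and B's label array
structure PInv (N : Nat) (p comp : List Int) : Prop where
  plen : p.length = N
  clen : comp.length = N
  ptr : ∀ m < N, 0 ≤ nthI p m → (nthI p m).toNat < N ∧ nthI comp (nthI p m).toNat = nthI comp m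
  inj : ∀ i < N, ∀ j < N, nthI p i < 0 → nthI p j < 0 → nthI comp i = nthI comp j → i = j
  reach : ∀ j < N, RootIn p j (N - numRoots p)

theorem pvG_eq_nthI (xs : List Int) (i : Int) (h0 : 0 ≤ i) (h1 : i < xs.length) :
    pvG xs i = nthI xs i.toNat := by
  unfold pvG nthI
  rw [PySem.List.pyGetD_eq_getElem (h0 := h0) (h1 := by simpa using h1)]
  rw [List.getD_eq_getElem _ _ (by omega)]

theorem nthI_set_self (p : List Int) (j : Nat) (v : Int) (h : j < p.length) :
    nthI (p.set j v) j = v := by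
  simp [nthI, List.getD, h]

theorem nthI_set_ne (p : List Int) (j m : Nat) (v : Int) (h : m ≠ j) :
    nthI (p.set j v) m = nthI p m := by
  simp [nthI, List.getD, List.getElem?_set_ne (by omega : j ≠ m)]

theorem rootIn_succ (p : List Int) : ∀ (k : Nat) (j : Nat), RootIn p j k → RootIn p j (k + 1) := by
  intro k
  induction k with
  | zero => intro j h; exact Or.inl h
  | succ k ih =>
    intro j h
    rcases h with h | h
    · exact Or.inl h
    · exact Or.inr (ih _ h)

theorem rootIn_mono (p : List Int) : ∀ (k k' : Nat) (j : Nat), k ≤ k' → RootIn p j k → RootIn p j k' := by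
  intro k k' j hle
  induction k', hle using Nat.le_induction with
  | base => exact fun h => h
  | succ k' hk ih => exact fun h => rootIn_succ p k' j (ih h)

-- path compression preserves chain bounds
theorem rootIn_compress (p : List Int) (j r : Nat) (hjlen : j < p.length)
    (hj : 0 ≤ nthI p j) (hr : nthI p r < 0) :
    ∀ (t : Nat) (m : Nat), RootIn p m t → RootIn (p.set j (r : Int)) m t := by
  have hrj : r ≠ j := fun h => by rw [h] at hr; omega
  intro t
  induction t with
  | zero =>
    intro m hm
    have hm' : nthI p m < 0 := hm
    have hmj : m ≠ j := fun h => by rw [h] at hm'; omega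
    show nthI (p.set j (r : Int)) m < 0
    rwa [nthI_set_ne p j m _ hmj]
  | succ t ih =>
    intro m hm
    rcases hm with hm | hm
    · have hmj : m ≠ j := fun h => by rw [h] at hm; omega
      exact Or.inl (by rwa [nthI_set_ne p j m _ hmj])
    · by_cases hmj : m = j
      · refine Or.inr ?_
        rw [hmj, nthI_set_self p j _ hjlen, Int.toNat_natCast]
        exact rootIn_mono _ 0 t r (Nat.zero_le _)
          (show nthI (p.set j (r : Int)) r < 0 by rwa [nthI_set_ne p j r _ hrj])
      · refine Or.inr ?_
        rw [nthI_set_ne p j m _ hmj]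
        exact ih _ hm

-- linking a root b under a (both roots) stretches chains by at most one
theorem rootIn_union (p : List Int) (a b : Nat) (w : Int) (hw : w < 0)
    (halen : a < p.length) (hblen : b < p.length)
    (ha : nthI p a < 0) (hb : nthI p b < 0) (hab : a ≠ b) :
    ∀ (t : Nat) (m : Nat), RootIn p m t → RootIn ((p.set a w).set b (a : Int)) m (t + 1) := by
  have hq : nthI ((p.set a w).set b (a : Int)) a < 0 := by
    rw [nthI_set_ne _ b a _ hab, nthI_set_self p a w halen]; exact hw
  have hroot : ∀ m, nthI p m < 0 → RootIn ((p.set a w).set b (a : Int)) m 1 := by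
    intro m hm
    by_cases hmb : m = b
    · refine Or.inr ?_
      rw [hmb, nthI_set_self _ b _ (by simpa using hblen), Int.toNat_natCast]
      exact hq
    · by_cases hma : m = a
      · rw [hma]; exact Or.inl hq
      · exact Or.inl (by rw [nthI_set_ne _ b m _ hmb, nthI_set_ne _ a m _ hma]; exact hm)
  intro t
  induction t with
  | zero => exact fun m hm => hroot m hm
  | succ t ih =>
    intro m hm
    rcases hm with hm | hm
    · exact rootIn_mono _ 1 (t + 2) m (by omega) (hroot m hm)
    · by_cases hneg : nthI p m < 0
      · exact rootIn_mono _ 1 (t + 2) m (by omega) (hroot m hneg)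
      · have hma : m ≠ a := fun h => by rw [h] at hneg; exact hneg ha
        have hmb : m ≠ b := fun h => by rw [h] at hneg; exact hneg hb
        refine Or.inr ?_
        rw [nthI_set_ne _ b m _ hmb, nthI_set_ne _ a m _ hma]
        exact ih _ hm

theorem nthI_eq_getElem (p : List Int) (j : Nat) (h : j < p.length) : nthI p j = p[j] :=
  List.getD_eq_getElem p 0 h

theorem lt_length_of_nthI_neg (p : List Int) (j : Nat) (h : nthI p j < 0) : j < p.length := by
  by_contra hc
  have : nthI p j = 0 := by
    unfold nthI
    rw [List.getD_eq_getElem?_getD, List.getElem?_eq_none (by omega)]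
    rfl
  omega

theorem numRoots_le (p : List Int) : numRoots p ≤ p.length := List.countP_le_length

theorem numRoots_set_keep (p : List Int) (j : Nat) (v : Int) (h : j < p.length)
    (hs : v < 0 ↔ nthI p j < 0) : numRoots (p.set j v) = numRoots p := by
  have hpj : (v < 0) ↔ (p[j] < 0) := by rwa [nthI_eq_getElem p j h] at hs
  unfold numRoots
  rw [List.countP_set h]
  have hb := List.boole_getElem_le_countP (p := fun x : Int => decide (x < 0)) (l := p) (i := j) h
  by_cases hv : v < 0
  · have h2 : p[j] < 0 := hpj.mp hv
    rw [if_pos (by simpa using h2)] at hb ⊢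
    rw [if_pos (by simpa using hv)]
    omega
  · have h2 : ¬ p[j] < 0 := fun hc => hv (hpj.mpr hc)
    rw [if_neg (by simpa using h2), if_neg (by simpa using hv)]
    omega

theorem numRoots_set_drop (p : List Int) (j : Nat) (v : Int) (h : j < p.length)
    (hneg : nthI p j < 0) (hv : 0 ≤ v) : numRoots (p.set j v) + 1 = numRoots p := by
  have h2 : p[j] < 0 := by rwa [nthI_eq_getElem p j h] at hneg
  have hv' : ¬ v < 0 := by omega
  unfold numRoots
  rw [List.countP_set h]
  have hb := List.boole_getElem_le_countP (p := fun x : Int => decide (x < 0)) (l := p) (i := j) h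
  rw [if_pos (by simpa using h2)] at hb ⊢
  rw [if_neg (by simpa using hv')]
  omega

theorem numRoots_pos (p : List Int) : ∀ (t j : Nat), RootIn p j t → 0 < numRoots p := by
  intro t
  induction t with
  | zero =>
    intro j hm
    have hm' : nthI p j < 0 := hm
    have hlen := lt_length_of_nthI_neg p j hm'
    refine List.countP_pos_iff.mpr ⟨p[j], List.getElem_mem hlen, ?_⟩
    rw [← nthI_eq_getElem p j hlen]
    simpa using hm'
  | succ t ih =>
    intro j hm
    rcases hm with hm | hm
    · have hlen := lt_length_of_nthI_neg p j hm
      refine List.countP_pos_iff.mpr ⟨p[j], List.getElem_mem hlen, ?_⟩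
      rw [← nthI_eq_getElem p j hlen]
      simpa using hm
    · exact ih _ hm

-- the big find_parent lemma
theorem find_spec (N : Nat) (comp : List Int) :
    ∀ (fuel k : Nat) (p : List Int) (j : Nat), p.length = N →
    (∀ m < N, 0 ≤ nthI p m → (nthI p m).toNat < N ∧ nthI comp (nthI p m).toNat = nthI comp m) →
    j < N → RootIn p j k → k < fuel →
    ∃ (p' : List Int) (r : Nat),
      findParent fuel p (j : Int) = (p', (r : Int)) ∧
      p'.length = N ∧ r < N ∧ nthI p' r < 0 ∧ nthI p r < 0 ∧
      nthI comp r = nthI comp j ∧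
      (∀ m < N, (nthI p' m < 0 ↔ nthI p m < 0) ∧ (nthI p m < 0 → nthI p' m = nthI p m)) ∧
      (∀ m < N, 0 ≤ nthI p' m → (nthI p' m).toNat < N ∧ nthI comp (nthI p' m).toNat = nthI comp m) ∧
      numRoots p' = numRoots p ∧
      (∀ t m, RootIn p m t → RootIn p' m t) := by
  intro fuel
  induction fuel with
  | zero => intro k p j _ _ _ _ hk; omega
  | succ fuel ih =>
    intro k p j hlen hptr hj hroot hk
    have hjlen : j < p.length := by omega
    have hget : PySem.List.pyGet? p (j : Int) = some p[j] := by
      rw [PySem.List.pyGet?_natCast]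
      exact List.getElem?_eq_getElem hjlen
    have hpj : p[j] = nthI p j := (nthI_eq_getElem p j hjlen).symm
    by_cases hneg : nthI p j < 0
    · refine ⟨p, j, ?_, hlen, hj, hneg, hneg, rfl,
        fun m _ => ⟨Iff.rfl, fun _ => rfl⟩, hptr, rfl, fun t m hm => hm⟩
      show findParent (fuel+1) p (j : Int) = (p, ((j : Nat) : Int))
      simp only [findParent, hget, hpj, if_pos hneg]
    · have hge : 0 ≤ nthI p j := by omega
      obtain ⟨hlt, hcomp⟩ := hptr j hj hge
      cases k with
      | zero => exact absurd (hroot : nthI p j < 0) hneg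
      | succ k =>
        have hroot' : RootIn p (nthI p j).toNat k := by
          rcases hroot with h | h
          · exact absurd h hneg
          · exact h
        obtain ⟨p1, r, heq, hlen1, hrN, hr1, hr0, hcomp1, hnegiff, hptr1, hnum1, hpres1⟩ :=
          ih k p (nthI p j).toNat hlen hptr hlt hroot' (by omega)
        have hj1ge : ¬ nthI p1 j < 0 := fun hc => hneg ((hnegiff j hj).1.mp hc)
        have hrj : r ≠ j := fun hc => hj1ge (hc ▸ hr1)
        have hjlen1 : j < p1.length := by omega
        have heqcast : ((nthI p j).toNat : Int) = nthI p j := Int.toNat_of_nonneg hge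
        have heval : findParent (fuel+1) p (j : Int) = (p1.set j (r : Int), (r : Int)) := by
          simp only [findParent, hget, hpj, if_neg hneg]
          rw [← heqcast, heq]
          simp only [PySem.List.pySetD_natCast]
          have h2len : (j : Int) < (p1.set j (r : Int)).length := by
            rw [List.length_set]; omega
          rw [pvG_eq_nthI _ _ (by omega) h2len, Int.toNat_natCast,
            nthI_set_self p1 j _ hjlen1]
        refine ⟨p1.set j (r : Int), r, heval, by rw [List.length_set]; exact hlen1, hrN, ?_, hr0,
          hcomp1.trans hcomp, ?_, ?_, ?_, ?_⟩
        · rwa [nthI_set_ne p1 j r _ hrj]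
        · intro m hm
          by_cases hmj : m = j
          · subst hmj
            constructor
            · rw [nthI_set_self p1 m _ hjlen1]
              constructor
              · intro hc; omega
              · intro hc; exact absurd hc hneg
            · intro hc; exact absurd hc hneg
          · rw [nthI_set_ne p1 j m _ hmj]
            exact hnegiff m hm
        · intro m hm hge'
          by_cases hmj : m = j
          · subst hmj
            rw [nthI_set_self p1 m _ hjlen1] at hge' ⊢
            rw [Int.toNat_natCast]
            exact ⟨hrN, hcomp1.trans hcomp⟩
          · rw [nthI_set_ne p1 j m _ hmj] at hge' ⊢
            exact hptr1 m hm hge'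
        · have hsk : ((r : Int) < 0 ↔ nthI p1 j < 0) := by
            constructor
            · intro hc; omega
            · intro hc; exact absurd hc hj1ge
          rw [numRoots_set_keep p1 j _ hjlen1 hsk]
          exact hnum1
        · intro t m hm
          exact rootIn_compress p1 j r hjlen1 (by omega) hr1 t m (hpres1 t m hm)

theorem pvGB_eq_pvG (xs : List Int) (i : Int) : pvGB xs i = pvG xs i := rfl

theorem nthI_map (f : Int → Int) (xs : List Int) (m : Nat) (h : m < xs.length) :
    nthI (xs.map f) m = f (nthI xs m) := by
  simp [nthI, List.getD, h]

-- performing the union step a ← a+b, b → a preserves the invariant against the relabelled comp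
theorem union_inv (N : Nat) (p2 comp : List Int) (a b : Nat) (cu cv : Int)
    (hlen2 : p2.length = N) (hclen : comp.length = N)
    (hptr2 : ∀ m < N, 0 ≤ nthI p2 m → (nthI p2 m).toNat < N ∧ nthI comp (nthI p2 m).toNat = nthI comp m)
    (hinj2 : ∀ i < N, ∀ j < N, nthI p2 i < 0 → nthI p2 j < 0 → nthI comp i = nthI comp j → i = j)
    (hreach2 : ∀ j < N, RootIn p2 j (N - numRoots p2))
    (haN : a < N) (hbN : b < N) (hab : a ≠ b)
    (hra : nthI p2 a < 0) (hrb : nthI p2 b < 0)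
    (hlab : (nthI comp a = cu ∧ nthI comp b = cv) ∨ (nthI comp a = cv ∧ nthI comp b = cu))
    (hcc : cu ≠ cv) :
    PInv N ((p2.set a (nthI p2 a + nthI p2 b)).set b ((a : Nat) : Int))
      (comp.map (fun x => if x = cv then cu else x)) := by
  have halen : a < p2.length := by omega
  have hblen : b < p2.length := by omega
  have hclen' : ∀ m : Nat, m < N → m < comp.length := by omega
  have hw : nthI p2 a + nthI p2 b < 0 := by omega
  have hblen' : b < (p2.set a (nthI p2 a + nthI p2 b)).length := by
    rw [List.length_set]; exact hblen
  have hp4b : nthI ((p2.set a (nthI p2 a + nthI p2 b)).set b ((a : Nat) : Int)) b = (a : Int) :=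
    nthI_set_self _ b _ hblen'
  have hp4a : nthI ((p2.set a (nthI p2 a + nthI p2 b)).set b ((a : Nat) : Int)) a
      = nthI p2 a + nthI p2 b := by
    rw [nthI_set_ne _ b a _ hab, nthI_set_self _ a _ halen]
  have hp4m : ∀ m : Nat, m ≠ a → m ≠ b →
      nthI ((p2.set a (nthI p2 a + nthI p2 b)).set b ((a : Nat) : Int)) m = nthI p2 m := by
    intro m hma hmb
    rw [nthI_set_ne _ b m _ hmb, nthI_set_ne _ a m _ hma]
  have hfa : nthI (comp.map (fun x => if x = cv then cu else x)) a = cu := by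
    rw [nthI_map _ _ _ (hclen' a haN)]
    rcases hlab with ⟨h1, _⟩ | ⟨h1, _⟩
    · rw [h1, if_neg hcc]
    · rw [h1, if_pos rfl]
  have hfb : nthI (comp.map (fun x => if x = cv then cu else x)) b = cu := by
    rw [nthI_map _ _ _ (hclen' b hbN)]
    rcases hlab with ⟨_, h1⟩ | ⟨_, h1⟩
    · rw [h1, if_pos rfl]
    · rw [h1, if_neg hcc]
  refine ⟨?_, ?_, ?_, ?_, ?_⟩
  · rw [List.length_set, List.length_set]; exact hlen2
  · rw [List.length_map]; exact hclen
  · intro m hm hge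
    by_cases hmb : m = b
    · rw [hmb, hp4b, Int.toNat_natCast]
      rw [hmb] at *
      exact ⟨haN, hfa.trans hfb.symm⟩
    · by_cases hma : m = a
      · rw [hma, hp4a] at hge; omega
      · rw [hp4m m hma hmb] at hge ⊢
        obtain ⟨hlt, heq⟩ := hptr2 m hm hge
        refine ⟨hlt, ?_⟩
        rw [nthI_map _ _ _ (hclen' _ hlt), nthI_map _ _ _ (hclen' m hm), heq]
  · intro i hi j hj hri hrj hcij
    have hib : i ≠ b := fun hc => by rw [hc, hp4b] at hri; omega
    have hjb : j ≠ b := fun hc => by rw [hc, hp4b] at hrj; omega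
    have hri2 : nthI p2 i < 0 := by
      by_cases hia : i = a
      · rw [hia]; exact hra
      · rwa [hp4m i hia hib] at hri
    have hrj2 : nthI p2 j < 0 := by
      by_cases hja : j = a
      · rw [hja]; exact hra
      · rwa [hp4m j hja hjb] at hrj
    rw [nthI_map _ _ _ (hclen' i hi), nthI_map _ _ _ (hclen' j hj)] at hcij
    by_cases hsame : nthI comp i = nthI comp j
    · exact hinj2 i hi j hj hri2 hrj2 hsame
    · exfalso
      split_ifs at hcij with h1 h2 h2
      · exact hsame (h1.trans h2.symm)
      · -- nthI comp i = cv, nthI comp j = cu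
        rcases hlab with ⟨ha1, hb1⟩ | ⟨ha1, hb1⟩
        · exact hib (hinj2 i hi b hbN hri2 hrb (h1.trans hb1.symm))
        · exact hjb (hinj2 j hj b hbN hrj2 hrb (hcij.symm.trans hb1.symm))
      · -- nthI comp j = cv, nthI comp i = cu
        rcases hlab with ⟨ha1, hb1⟩ | ⟨ha1, hb1⟩
        · exact hjb (hinj2 j hj b hbN hrj2 hrb (h2.trans hb1.symm))
        · exact hib (hinj2 i hi b hbN hri2 hrb (hcij.trans hb1.symm))
      · exact hsame hcij
  · have e1 : numRoots (p2.set a (nthI p2 a + nthI p2 b)) = numRoots p2 :=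
      numRoots_set_keep p2 a _ halen (iff_of_true hw hra)
    have e2 : numRoots ((p2.set a (nthI p2 a + nthI p2 b)).set b ((a : Nat) : Int)) + 1
        = numRoots (p2.set a (nthI p2 a + nthI p2 b)) := by
      refine numRoots_set_drop _ b _ hblen' ?_ (by omega)
      rw [nthI_set_ne _ a b _ (fun hc => hab hc.symm)]
      exact hrb
    have h1 : 0 < numRoots p2 := numRoots_pos p2 0 b hrb
    have h2 : numRoots p2 ≤ N := hlen2 ▸ numRoots_le p2
    intro jj hjj
    have hstep := rootIn_union p2 a b _ hw halen hblen hra hrb hab _ jj (hreach2 jj hjj)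
    have harith : N - numRoots ((p2.set a (nthI p2 a + nthI p2 b)).set b ((a : Nat) : Int))
        = N - numRoots p2 + 1 := by omega
    rw [harith]
    exact hstep

theorem merge_spec (N : Nat) (p comp : List Int) (u v : Int) (hInv : PInv N p comp)
    (hu0 : 0 ≤ u) (hu1 : u < (N : Int)) (hv0 : 0 ≤ v) (hv1 : v < (N : Int)) :
    ∃ (p' : List Int), mergeNetwork (N + 1) p u v =
        (p', decide (nthI comp u.toNat ≠ nthI comp v.toNat)) ∧
      PInv N p' (if nthI comp u.toNat ≠ nthI comp v.toNat then
          comp.map (fun x => if x = nthI comp v.toNat then nthI comp u.toNat else x) else comp) := by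
  obtain ⟨hplen, hclen, hptr, hinj, hreach⟩ := hInv
  have hjuN : u.toNat < N := by omega
  have hjvN : v.toNat < N := by omega
  have hu' : u = ((u.toNat : Nat) : Int) := (Int.toNat_of_nonneg hu0).symm
  have hv' : v = ((v.toNat : Nat) : Int) := (Int.toNat_of_nonneg hv0).symm
  obtain ⟨p1, pu, heq1, hlen1, hpuN, hpu1, hpu0, hcompu, hnegiff1, hptr1, hnum1, hpres1⟩ :=
    find_spec N comp (N + 1) (N - numRoots p) p u.toNat hplen hptr hjuN
      (hreach u.toNat hjuN) (by omega)
  obtain ⟨p2, pv, heq2, hlen2, hpvN, hpv2, hpv1, hcompv, hnegiff2, hptr2, hnum2, hpres2⟩ :=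
    find_spec N comp (N + 1) (N - numRoots p1) p1 v.toNat hlen1 hptr1 hjvN
      (by rw [hnum1]; exact hpres1 _ _ (hreach v.toNat hjvN)) (by omega)
  have hpu2 : nthI p2 pu < 0 := (hnegiff2 pu hpuN).1.mpr hpu1
  have hpu2v : nthI p2 pu = nthI p1 pu := (hnegiff2 pu hpuN).2 hpu1
  have hnum21 : numRoots p2 = numRoots p := hnum2.trans hnum1
  have hinj2 : ∀ i < N, ∀ j < N, nthI p2 i < 0 → nthI p2 j < 0 → nthI comp i = nthI comp j → i = j := by
    intro i hi j hj hri hrj hc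
    exact hinj i hi j hj ((hnegiff1 i hi).1.mp ((hnegiff2 i hi).1.mp hri))
      ((hnegiff1 j hj).1.mp ((hnegiff2 j hj).1.mp hrj)) hc
  have hreach2 : ∀ j < N, RootIn p2 j (N - numRoots p2) := by
    intro j hj
    rw [hnum21]
    exact hpres2 _ _ (hpres1 _ _ (hreach j hj))
  by_cases hcase : nthI comp u.toNat = nthI comp v.toNat
  · -- labels equal: the roots coincide, no merge
    have hpupv : pu = pv :=
      hinj2 pu hpuN pv hpvN hpu2 hpv2 (hcompu.trans (hcase.trans hcompv.symm))
    have hflag : decide (nthI comp u.toNat ≠ nthI comp v.toNat) = false := by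
      simp [hcase]
    refine ⟨p2, ?_, ?_⟩
    · rw [hflag]
      show mergeNetwork (N + 1) p u v = (p2, false)
      rw [hu', hv']
      simp only [mergeNetwork, heq1, heq2]
      rw [if_neg (by simp [hpupv])]
    · rw [if_neg (fun hc => hc hcase)]
      exact ⟨hlen2, hclen, hptr2, hinj2, hreach2⟩
  · -- labels differ: the merge happens
    have hpupv : pu ≠ pv := fun hc =>
      hcase (hcompu.symm.trans ((congrArg (nthI comp) hc).trans hcompv))
    have hflag : decide (nthI comp u.toNat ≠ nthI comp v.toNat) = true := by
      simp [hcase]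
    have hlab1 : nthI comp pu = nthI comp u.toNat := hcompu
    have hlab2 : nthI comp pv = nthI comp v.toNat := hcompv
    rw [hflag, if_pos (fun hc => hcase hc)]
    by_cases hsw : nthI p2 pu > nthI p2 pv
    · -- swapped: a := pv, b := pu
      refine ⟨(p2.set pv (nthI p2 pv + nthI p2 pu)).set pu ((pv : Nat) : Int), ?_, ?_⟩
      · rw [hu', hv']
        simp only [mergeNetwork, heq1, heq2]
        rw [if_pos (by simpa using hpupv)]
        rw [pvG_eq_nthI _ _ (by omega) (by rw [hlen2]; exact_mod_cast hpuN),
          pvG_eq_nthI _ _ (by omega) (by rw [hlen2]; exact_mod_cast hpvN),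
          Int.toNat_natCast, Int.toNat_natCast, if_pos hsw]
        simp only
        rw [pvG_eq_nthI _ _ (by omega) (by rw [hlen2]; exact_mod_cast hpvN),
          pvG_eq_nthI _ _ (by omega) (by rw [hlen2]; exact_mod_cast hpuN),
          Int.toNat_natCast, Int.toNat_natCast]
        simp only [PySem.List.pySetD_natCast]
      · exact union_inv N p2 comp pv pu (nthI comp u.toNat) (nthI comp v.toNat)
          hlen2 hclen hptr2 hinj2 hreach2 hpvN hpuN (fun hc => hpupv hc.symm) hpv2 hpu2
          (Or.inr ⟨hlab2, hlab1⟩) (fun hc => hcase hc)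
    · -- unswapped: a := pu, b := pv
      refine ⟨(p2.set pu (nthI p2 pu + nthI p2 pv)).set pv ((pu : Nat) : Int), ?_, ?_⟩
      · rw [hu', hv']
        simp only [mergeNetwork, heq1, heq2]
        rw [if_pos (by simpa using hpupv)]
        rw [pvG_eq_nthI _ _ (by omega) (by rw [hlen2]; exact_mod_cast hpuN),
          pvG_eq_nthI _ _ (by omega) (by rw [hlen2]; exact_mod_cast hpvN),
          Int.toNat_natCast, Int.toNat_natCast, if_neg hsw]
        simp only
        rw [pvG_eq_nthI _ _ (by omega) (by rw [hlen2]; exact_mod_cast hpuN),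
          pvG_eq_nthI _ _ (by omega) (by rw [hlen2]; exact_mod_cast hpvN),
          Int.toNat_natCast, Int.toNat_natCast]
        simp only [PySem.List.pySetD_natCast]
      · exact union_inv N p2 comp pu pv (nthI comp u.toNat) (nthI comp v.toNat)
          hlen2 hclen hptr2 hinj2 hreach2 hpuN hpvN hpupv hpu2 hpv2
          (Or.inl ⟨hlab1, hlab2⟩) (fun hc => hcase hc)

theorem loop_spec (N : Nat) : ∀ (conns : List (List Int)) (p comp : List Int) (cnt : Int),
    PInv N p comp →
    (∀ c ∈ conns, ∃ u v, c = [u, v] ∧ 0 ≤ u ∧ u < (N : Int) ∧ 0 ≤ v ∧ v < (N : Int)) →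
    (conns.foldl (fun (st : List Int × Int) conn =>
      match conn with
      | [u, v] =>
        let m := mergeNetwork (N + 1) st.1 u v
        (m.1, if m.2 then st.2 + 1 else st.2)
      | _ => st) (p, cnt)).2
    = (conns.foldl altStep (comp, cnt)).2 := by
  intro conns
  induction conns with
  | nil => intro p comp cnt _ _; rfl
  | cons c rest ih =>
    intro p comp cnt hInv hcs
    obtain ⟨u, v, hc, hu0, hu1, hv0, hv1⟩ := hcs c List.mem_cons_self
    subst hc
    obtain ⟨p', hm, hInv'⟩ := merge_spec N p comp u v hInv hu0 hu1 hv0 hv1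
    have hclen : comp.length = N := hInv.clen
    have hcu : pvGB comp u = nthI comp u.toNat := by
      rw [pvGB_eq_pvG]; exact pvG_eq_nthI comp u hu0 (by rw [hclen]; exact hu1)
    have hcv : pvGB comp v = nthI comp v.toNat := by
      rw [pvGB_eq_pvG]; exact pvG_eq_nthI comp v hv0 (by rw [hclen]; exact hv1)
    simp only [List.foldl_cons, altStep, List.length_cons, List.length_nil, List.getD, hm]
    norm_num [hcu, hcv]
    by_cases hcase : nthI comp u.toNat = nthI comp v.toNat
    · simp only [if_pos hcase]
      rw [if_neg (fun hc => hc hcase)] at hInv'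
      exact ih _ _ _ hInv' (fun c hc => hcs c (List.mem_cons_of_mem _ hc))
    · simp only [if_neg hcase]
      rw [if_pos hcase] at hInv'
      exact ih _ _ _ hInv' (fun c hc => hcs c (List.mem_cons_of_mem _ hc))

theorem init_inv (n : Int) :
    PInv n.toNat ((PySem.List.pyRange 0 n 1).map (fun _ => (-1 : Int))) (PySem.List.pyRange 0 n 1) := by
  have hrl : (PySem.List.pyRange 0 n 1).length = n.toNat := by
    rw [PySem.List.length_pyRange_one]; simp
  have hpl : ((PySem.List.pyRange 0 n 1).map (fun _ => (-1 : Int))).length = n.toNat := by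
    rw [List.length_map]; exact hrl
  have hp0 : ∀ j < n.toNat, nthI ((PySem.List.pyRange 0 n 1).map (fun _ => (-1 : Int))) j = -1 := by
    intro j hj
    rw [nthI_map _ _ _ (by rw [hrl]; exact hj)]
  have hc0 : ∀ j < n.toNat, nthI (PySem.List.pyRange 0 n 1) j = (j : Int) := by
    intro j hj
    rw [nthI_eq_getElem _ _ (by rw [hrl]; exact hj), PySem.List.getElem_pyRange_one]
    simp
  have hnr : numRoots ((PySem.List.pyRange 0 n 1).map (fun _ => (-1 : Int))) = n.toNat := by
    unfold numRoots
    rw [List.countP_map]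
    have : ((fun x : Int => decide (x < 0)) ∘ (fun _ : Int => (-1 : Int))) = fun _ => true := by
      funext x; simp
    rw [this, List.countP_true]
    exact hrl
  refine ⟨hpl, hrl, ?_, ?_, ?_⟩
  · intro m hm hge
    rw [hp0 m hm] at hge
    omega
  · intro i hi j hj _ _ hc
    rw [hc0 i hi, hc0 j hj] at hc
    exact_mod_cast hc
  · intro j hj
    rw [hnr, Nat.sub_self]
    show nthI _ j < 0
    rw [hp0 j hj]
    omega

-- ===== VERDICT (by name: the statement is the Claim_ definition above) =====
theorem makeConnected_spec : Claim_equal_makeConnected := by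
  intro n conns _ hpre
  unfold Spec_makeConnected makeConnected makeConnected_alt
  by_cases hg : (conns.length : Int) < n - 1
  · rw [if_pos hg, if_pos hg]
  · rw [if_neg hg, if_neg hg]
    have hforall : ∀ c ∈ conns, c.length = 2 ∧ ∀ x ∈ c, 0 ≤ x ∧ x < n := by
      rcases hpre with h | h
      · exact absurd h hg
      · exact h
    have hcs : ∀ c ∈ conns, ∃ u v, c = [u, v] ∧ 0 ≤ u ∧ u < (n.toNat : Int) ∧ 0 ≤ v ∧ v < (n.toNat : Int) := by
      intro c hc
      obtain ⟨hlen2, hbounds⟩ := hforall c hc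
      match c, hlen2 with
      | [u, v], _ =>
        obtain ⟨hu0, hu1⟩ := hbounds u (by simp)
        obtain ⟨hv0, hv1⟩ := hbounds v (by simp)
        exact ⟨u, v, rfl, hu0, by omega, hv0, by omega⟩
    have hfl : ((PySem.List.pyRange 0 n 1).map (fun _ => (-1 : Int))).length = n.toNat := by
      rw [List.length_map, PySem.List.length_pyRange_one]; simp
    simp only [hfl]
    have := loop_spec n.toNat conns ((PySem.List.pyRange 0 n 1).map (fun _ => (-1 : Int)))
      (PySem.List.pyRange 0 n 1) 0 (init_inv n) hcs
    rw [this]
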